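-- pv_equiv track=rewrite | github.com/PengNi/plant_5mC_analysis | stats_nanopore_only_cytosines_profiling/generate_Cdistri_in_repeats.py | reformat_regioninfo_to_chrom2regions
-- ===== SOURCE A (Python) =====
-- sep = "||"
--
-- def reformat_regioninfo_to_chrom2regions(regioninfo):
--     chrom2regions = dict()
--     for region in regioninfo:
--         chrom, start, end, name, score, strand = region
--         keytmp = sep.join([chrom, strand])
--         if keytmp not in chrom2regions.keys():
--             chrom2regions[keytmp] = []
--         chrom2regions[keytmp].append((start, end))
--     return chrom2regions
-- ===== SOURCE B (Python) =====
-- sep = "||"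
--
-- def reformat_regioninfo_to_chrom2regions(regioninfo):
--     # two-pass: distinct keys in first-occurrence order, then one comprehension per key
--     keys = list(dict.fromkeys(sep.join([r[0], r[5]]) for r in regioninfo))
--     return {k: [(r[1], r[2]) for r in regioninfo
--                 if sep.join([r[0], r[5]]) == k]
--             for k in keys}
-- ===== Notes on version B (the rewrite author's own statement) =====
-- stated objective: alternative
-- what changed: Replaces A's single-pass dict accumulation with a two-pass scheme: dedup the chrom||strand keys in first-occurrence order, then build each key's value list by a filtered comprehension over the input.
import Mathlib
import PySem

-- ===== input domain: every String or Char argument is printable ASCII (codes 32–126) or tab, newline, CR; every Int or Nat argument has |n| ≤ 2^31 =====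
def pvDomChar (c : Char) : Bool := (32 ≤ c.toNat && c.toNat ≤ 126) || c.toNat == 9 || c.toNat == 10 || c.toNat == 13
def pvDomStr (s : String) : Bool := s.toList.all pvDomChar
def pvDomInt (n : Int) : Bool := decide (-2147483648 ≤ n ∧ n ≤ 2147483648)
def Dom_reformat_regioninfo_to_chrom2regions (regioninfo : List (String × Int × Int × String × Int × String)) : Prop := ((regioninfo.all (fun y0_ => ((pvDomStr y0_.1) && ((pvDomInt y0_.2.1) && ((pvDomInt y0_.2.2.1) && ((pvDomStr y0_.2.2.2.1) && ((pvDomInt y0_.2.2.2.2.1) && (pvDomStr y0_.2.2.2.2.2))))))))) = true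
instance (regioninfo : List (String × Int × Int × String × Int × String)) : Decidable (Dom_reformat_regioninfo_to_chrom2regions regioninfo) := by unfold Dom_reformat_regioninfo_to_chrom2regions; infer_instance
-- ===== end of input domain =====

-- B replaces A's one-pass dict accumulation by a two-pass scheme (dedup the keys in first-occurrence
-- order, then one filtered pass per key); objective: alternative decomposition, not faster.

-- ===== PORT A =====
def reformat_regioninfo_to_chrom2regions (regioninfo : List (String × Int × Int × String × Int × String)) : List (String × List (Int × Int)) :=
  (regioninfo.foldl (fun d r =>
      let keytmp := PySem.Str.join "||" [r.1, r.2.2.2.2.2]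
      let d := if d.contains keytmp = false then d.insert keytmp [] else d
      d.modify keytmp [] (fun v => v ++ [(r.2.1, r.2.2.1)])
    ) PySem.Dict.empty).items

-- ===== PORT B =====
def pvKey (r : String × Int × Int × String × Int × String) : String :=
  PySem.Str.join "||" [r.1, r.2.2.2.2.2]

def reformat_regioninfo_to_chrom2regions_alt (regioninfo : List (String × Int × Int × String × Int × String)) : List (String × List (Int × Int)) :=
  (PySem.List.dedup (regioninfo.map pvKey)).map (fun k =>
    (k, (regioninfo.filter (fun r => pvKey r == k)).map (fun r => (r.2.1, r.2.2.1))))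

-- ===== PRECONDITION & SPEC =====
def Spec_reformat_regioninfo_to_chrom2regions (regioninfo : List (String × Int × Int × String × Int × String)) (out : List (String × List (Int × Int))) : Prop := out = reformat_regioninfo_to_chrom2regions_alt regioninfo
instance (regioninfo : List (String × Int × Int × String × Int × String)) (out : List (String × List (Int × Int))) : Decidable (Spec_reformat_regioninfo_to_chrom2regions regioninfo out) := by unfold Spec_reformat_regioninfo_to_chrom2regions; infer_instance

-- ===== CLAIM (what is proved, stated in full; the proofs are below) =====
def Claim_equal_reformat_regioninfo_to_chrom2regions : Prop := ∀ (regioninfo : List (String × Int × Int × String × Int × String)), Dom_reformat_regioninfo_to_chrom2regions regioninfo → Spec_reformat_regioninfo_to_chrom2regions regioninfo (reformat_regioninfo_to_chrom2regions regioninfo)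

-- ===== LEMMAS AND PROOFS =====

-- A's "if new key: d[key] = []" followed by the append is one 'modify' step.
theorem pv_step_eq (d : PySem.Dict String (List (Int × Int))) (r : String × Int × Int × String × Int × String) :
    (let keytmp := PySem.Str.join "||" [r.1, r.2.2.2.2.2]
     let d := if d.contains keytmp = false then d.insert keytmp [] else d
     d.modify keytmp [] (fun v => v ++ [(r.2.1, r.2.2.1)]))
    = d.modify (pvKey r) [] (fun v => v ++ [(r.2.1, r.2.2.1)]) := by
  simp only [pvKey]
  set k := PySem.Str.join "||" [r.1, r.2.2.2.2.2] with hk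
  set f : List (Int × Int) → List (Int × Int) := fun v => v ++ [(r.2.1, r.2.2.1)] with hf
  by_cases h : d.contains k = false
  · rw [if_pos h]
    have h' : (d.items.any fun p => p.1 == k) = false := by
      simpa [PySem.Dict.contains] using h
    have hne : ∀ p ∈ d.items, p.1 ≠ k := by
      intro p hp
      have := List.any_eq_false.mp h' p hp
      simpa using this
    have hfind : List.find? (fun p => p.1 == k) d.items = none := by
      simp only [List.find?_eq_none]
      intro p hp; simpa using hne p hp
    have hmap : List.map (fun p => if p.1 = k then (k, f []) else p) d.items = d.items := by
      calc d.items.map (fun p => if p.1 = k then (k, f []) else p)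
          = d.items.map id := List.map_congr_left (fun p hp => by simp [hne p hp])
        _ = d.items := List.map_id _
    simp [PySem.Dict.modify, PySem.Dict.insert, PySem.Dict.contains, PySem.Dict.getD, PySem.Dict.get?, h', hfind, hmap]
  · simp [h]

-- the modify-only loop, characterised: dedup'd keys, each carrying its filtered values
theorem pv_main (ri : List (String × Int × Int × String × Int × String)) :
    (ri.foldl (fun d r => d.modify (pvKey r) [] (fun v => v ++ [(r.2.1, r.2.2.1)])) (PySem.Dict.empty : PySem.Dict String (List (Int × Int)))).items
    = reformat_regioninfo_to_chrom2regions_alt ri := by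
  unfold reformat_regioninfo_to_chrom2regions_alt
  have hfm : ri.foldl (fun d r => d.modify (pvKey r) [] (fun v => v ++ [(r.2.1, r.2.2.1)])) (PySem.Dict.empty : PySem.Dict String (List (Int × Int)))
      = (ri.map (fun r => (pvKey r, (r.2.1, r.2.2.1)))).foldl (fun d p => d.modify p.1 [] (fun v => v ++ [p.2])) PySem.Dict.empty := by
    rw [List.foldl_map]
  rw [hfm]
  set l := ri.map (fun r => (pvKey r, (r.2.1, r.2.2.1))) with hl
  set D := l.foldl (fun d p => d.modify p.1 [] (fun v => v ++ [p.2])) (PySem.Dict.empty : PySem.Dict String (List (Int × Int))) with hD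
  have hkeys : D.keys = PySem.List.dedup (ri.map pvKey) := by
    rw [hD, PySem.Dict.keys_foldl_modify_key]
    simp [hl, List.map_map, PySem.Set.update_nil_left, Function.comp_def]
  have hnd : D.keys.Nodup := by
    rw [hD]
    exact PySem.Dict.nodup_keys_foldl_modify_key _ _ _ _ _ (by simp)
  have hgetD : ∀ k, D.getD k [] = (ri.filter (fun r => pvKey r == k)).map (fun r => (r.2.1, r.2.2.1)) := by
    intro k
    rw [hD, PySem.Dict.getD_foldl_modify_append]
    simp [hl, List.filter_map, List.map_map, Function.comp_def]
  rw [PySem.Dict.items_eq_map_keys D hnd ([] : List (Int × Int)), hkeys]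
  exact List.map_congr_left (fun k _ => by rw [hgetD k])

-- ===== VERDICT (by name: the statement is the Claim_ definition above) =====
theorem reformat_regioninfo_to_chrom2regions_spec : Claim_equal_reformat_regioninfo_to_chrom2regions := by
  intro ri _
  unfold Spec_reformat_regioninfo_to_chrom2regions reformat_regioninfo_to_chrom2regions
  rw [show (fun (d : PySem.Dict String (List (Int × Int))) r =>
        let keytmp := PySem.Str.join "||" [r.1, r.2.2.2.2.2]
        let d := if d.contains keytmp = false then d.insert keytmp [] else d
        d.modify keytmp [] (fun v => v ++ [(r.2.1, r.2.2.1)]))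
      = fun d r => d.modify (pvKey r) [] (fun v => v ++ [(r.2.1, r.2.2.1)])
    from funext fun d => funext fun r => pv_step_eq d r]
  exact pv_main ri
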